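-- pv_equiv track=rewrite | github.com/Rxshni/FloatChat | src/engine/ocean_engine.py | detect_species
-- ===== SOURCE A (Python) =====
-- SPECIES_KEYWORDS: dict[str, list[str]] = {
--     "anchovy":               ["anchovy", "anchovies", "thryssa", "stolephorus",
--                               "cuvierii", "mystax", "indian anchovy"],
--     "hilsa":                 ["hilsa", "ilisha", "tenualosa", "jatka", "hilsha"],
--     "mackerel":              ["mackerel", "rastrelliger", "bangda", "ayala",
--                               "kanagurta", "indian mackerel"],
--     "pomfret":               ["pomfret", "pampus", "rupchanda", "avoli",
--                               "argenteus", "white pomfret"],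
--     "prawn":                 ["prawn", "shrimp", "penaeus", "monodon",
--                               "tiger prawn", "tiger shrimp"],
--     "sardine":               ["sardine", "sardinella", "mathi", "oil sardine",
--                               "longiceps", "indian oil sardine"],
--     "seer_fish":             ["seer", "surmai", "vanjaram", "scomberomorus",
--                               "spanish mackerel", "commerson", "king fish",
--                               "kingfish", "narrow barred"],
--     "skipjack_tuna":         ["skipjack", "katsuwonus", "pelamis",
--                               "stripe tuna", "stripe belly tuna"],
--     "squid":                 ["squid", "uroteuthis", "duvaucelii", "calamari",
--                               "indian squid"],
--     "yellowfin_tuna":        ["yellowfin", "thunnus", "albacares", "kanta",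
--                               "yellow fin"],
--     "black_banded_trevally": ["trevally", "seriolina", "black banded",
--                               "nigrofasciata"],
--     "spiny_lobster":         ["lobster", "panulirus", "homarus",
--                               "spiny lobster", "scalloped lobster"],
-- }
--
-- def detect_species(question: str) -> str | None:
--     q = question.lower()
--     for species_key, keywords in sorted(
--         SPECIES_KEYWORDS.items(),
--         key=lambda x: max(len(k) for k in x[1]),
--         reverse=True,
--     ):
--         if any(kw in q for kw in keywords):
--             return species_key
--     return None
-- ===== SOURCE B (Python) =====
-- # Different data structure: instead of sorting the species dict on every call,
-- # the search order is precomputed once into a flat priority-ordered keyword table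
-- # (species in descending max-keyword-length order, ties keeping dict insertion
-- # order, keywords in their original order); detection is then a single flat scan
-- # returning the species of the first keyword found in the lowered question.
-- KEYWORD_TABLE: list[tuple[str, str]] = [
--     ('sardine', 'sardine'),
--     ('sardinella', 'sardine'),
--     ('mathi', 'sardine'),
--     ('oil sardine', 'sardine'),
--     ('longiceps', 'sardine'),
--     ('indian oil sardine', 'sardine'),
--     ('skipjack', 'skipjack_tuna'),
--     ('katsuwonus', 'skipjack_tuna'),
--     ('pelamis', 'skipjack_tuna'),
--     ('stripe tuna', 'skipjack_tuna'),
--     ('stripe belly tuna', 'skipjack_tuna'),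
--     ('lobster', 'spiny_lobster'),
--     ('panulirus', 'spiny_lobster'),
--     ('homarus', 'spiny_lobster'),
--     ('spiny lobster', 'spiny_lobster'),
--     ('scalloped lobster', 'spiny_lobster'),
--     ('seer', 'seer_fish'),
--     ('surmai', 'seer_fish'),
--     ('vanjaram', 'seer_fish'),
--     ('scomberomorus', 'seer_fish'),
--     ('spanish mackerel', 'seer_fish'),
--     ('commerson', 'seer_fish'),
--     ('king fish', 'seer_fish'),
--     ('kingfish', 'seer_fish'),
--     ('narrow barred', 'seer_fish'),
--     ('mackerel', 'mackerel'),
--     ('rastrelliger', 'mackerel'),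
--     ('bangda', 'mackerel'),
--     ('ayala', 'mackerel'),
--     ('kanagurta', 'mackerel'),
--     ('indian mackerel', 'mackerel'),
--     ('anchovy', 'anchovy'),
--     ('anchovies', 'anchovy'),
--     ('thryssa', 'anchovy'),
--     ('stolephorus', 'anchovy'),
--     ('cuvierii', 'anchovy'),
--     ('mystax', 'anchovy'),
--     ('indian anchovy', 'anchovy'),
--     ('pomfret', 'pomfret'),
--     ('pampus', 'pomfret'),
--     ('rupchanda', 'pomfret'),
--     ('avoli', 'pomfret'),
--     ('argenteus', 'pomfret'),
--     ('white pomfret', 'pomfret'),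
--     ('trevally', 'black_banded_trevally'),
--     ('seriolina', 'black_banded_trevally'),
--     ('black banded', 'black_banded_trevally'),
--     ('nigrofasciata', 'black_banded_trevally'),
--     ('prawn', 'prawn'),
--     ('shrimp', 'prawn'),
--     ('penaeus', 'prawn'),
--     ('monodon', 'prawn'),
--     ('tiger prawn', 'prawn'),
--     ('tiger shrimp', 'prawn'),
--     ('squid', 'squid'),
--     ('uroteuthis', 'squid'),
--     ('duvaucelii', 'squid'),
--     ('calamari', 'squid'),
--     ('indian squid', 'squid'),
--     ('yellowfin', 'yellowfin_tuna'),
--     ('thunnus', 'yellowfin_tuna'),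
--     ('albacares', 'yellowfin_tuna'),
--     ('kanta', 'yellowfin_tuna'),
--     ('yellow fin', 'yellowfin_tuna'),
--     ('hilsa', 'hilsa'),
--     ('ilisha', 'hilsa'),
--     ('tenualosa', 'hilsa'),
--     ('jatka', 'hilsa'),
--     ('hilsha', 'hilsa'),
-- ]
--
--
-- def detect_species(question: str) -> str | None:
--     q = question.lower()
--     return next((sp for kw, sp in KEYWORD_TABLE if kw in q), None)
-- ===== Notes on version B (the rewrite author's own statement) =====
-- stated objective: alternative
-- what changed: Replaces sorting the species dict by max-keyword-length on every call and testing each species' keyword list with a precomputed flat priority-ordered keyword-to-species table (built once at module load) that is scanned once per call, returning the species of the first keyword contained in the lowered question.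
import Mathlib
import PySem

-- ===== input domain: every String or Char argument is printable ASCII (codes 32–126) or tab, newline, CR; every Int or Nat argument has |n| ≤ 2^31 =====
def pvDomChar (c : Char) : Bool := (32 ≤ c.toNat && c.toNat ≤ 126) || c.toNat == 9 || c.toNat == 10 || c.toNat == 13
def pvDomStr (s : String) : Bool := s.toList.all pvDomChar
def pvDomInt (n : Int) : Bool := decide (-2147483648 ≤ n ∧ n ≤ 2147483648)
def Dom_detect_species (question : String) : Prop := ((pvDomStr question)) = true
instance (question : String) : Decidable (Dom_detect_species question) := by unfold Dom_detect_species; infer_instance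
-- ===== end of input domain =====

-- B replaces A's per-call sort of the species dict by a precomputed flat
-- priority-ordered keyword→species table scanned once per call; objective:
-- alternative data structure, same result.

-- ===== PORT A =====
def SPECIES_KEYWORDS : PySem.Dict String (List String) := PySem.Dict.mk [
  ("anchovy", ["anchovy", "anchovies", "thryssa", "stolephorus", "cuvierii", "mystax", "indian anchovy"]),
  ("hilsa", ["hilsa", "ilisha", "tenualosa", "jatka", "hilsha"]),
  ("mackerel", ["mackerel", "rastrelliger", "bangda", "ayala", "kanagurta", "indian mackerel"]),
  ("pomfret", ["pomfret", "pampus", "rupchanda", "avoli", "argenteus", "white pomfret"]),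
  ("prawn", ["prawn", "shrimp", "penaeus", "monodon", "tiger prawn", "tiger shrimp"]),
  ("sardine", ["sardine", "sardinella", "mathi", "oil sardine", "longiceps", "indian oil sardine"]),
  ("seer_fish", ["seer", "surmai", "vanjaram", "scomberomorus", "spanish mackerel", "commerson", "king fish", "kingfish", "narrow barred"]),
  ("skipjack_tuna", ["skipjack", "katsuwonus", "pelamis", "stripe tuna", "stripe belly tuna"]),
  ("squid", ["squid", "uroteuthis", "duvaucelii", "calamari", "indian squid"]),
  ("yellowfin_tuna", ["yellowfin", "thunnus", "albacares", "kanta", "yellow fin"]),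
  ("black_banded_trevally", ["trevally", "seriolina", "black banded", "nigrofasciata"]),
  ("spiny_lobster", ["lobster", "panulirus", "homarus", "spiny lobster", "scalloped lobster"])]

-- max(len(k) for k in kws); the .getD 0 is unreachable: every keyword list in the
-- literal dict is nonempty (Python's max would raise only on an empty one).
def maxKwLen (kws : List String) : Int :=
  (PySem.List.max? (kws.map PySem.Str.len) (fun y => y)).getD 0

-- the for-loop of A: first species whose keyword list has a substring match
def detect_species_loop (q : String) : List (String × List String) → Option String
  | [] => none
  | (species_key, keywords) :: rest =>
      if keywords.any (fun kw => PySem.Str.isIn kw q) then some species_key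
      else detect_species_loop q rest

def detect_species (question : String) : Option String :=
  detect_species_loop (PySem.Str.lower question)
    (PySem.List.sorted SPECIES_KEYWORDS.items (fun x => maxKwLen x.2) true)

-- ===== PORT B =====
-- Source B's module-level constant: keyword → species, flattened in descending
-- max-keyword-length priority (ties keep dict insertion order)
def KEYWORD_TABLE : List (String × String) := [
  ("sardine", "sardine"),
  ("sardinella", "sardine"),
  ("mathi", "sardine"),
  ("oil sardine", "sardine"),
  ("longiceps", "sardine"),
  ("indian oil sardine", "sardine"),
  ("skipjack", "skipjack_tuna"),
  ("katsuwonus", "skipjack_tuna"),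
  ("pelamis", "skipjack_tuna"),
  ("stripe tuna", "skipjack_tuna"),
  ("stripe belly tuna", "skipjack_tuna"),
  ("lobster", "spiny_lobster"),
  ("panulirus", "spiny_lobster"),
  ("homarus", "spiny_lobster"),
  ("spiny lobster", "spiny_lobster"),
  ("scalloped lobster", "spiny_lobster"),
  ("seer", "seer_fish"),
  ("surmai", "seer_fish"),
  ("vanjaram", "seer_fish"),
  ("scomberomorus", "seer_fish"),
  ("spanish mackerel", "seer_fish"),
  ("commerson", "seer_fish"),
  ("king fish", "seer_fish"),
  ("kingfish", "seer_fish"),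
  ("narrow barred", "seer_fish"),
  ("mackerel", "mackerel"),
  ("rastrelliger", "mackerel"),
  ("bangda", "mackerel"),
  ("ayala", "mackerel"),
  ("kanagurta", "mackerel"),
  ("indian mackerel", "mackerel"),
  ("anchovy", "anchovy"),
  ("anchovies", "anchovy"),
  ("thryssa", "anchovy"),
  ("stolephorus", "anchovy"),
  ("cuvierii", "anchovy"),
  ("mystax", "anchovy"),
  ("indian anchovy", "anchovy"),
  ("pomfret", "pomfret"),
  ("pampus", "pomfret"),
  ("rupchanda", "pomfret"),
  ("avoli", "pomfret"),
  ("argenteus", "pomfret"),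
  ("white pomfret", "pomfret"),
  ("trevally", "black_banded_trevally"),
  ("seriolina", "black_banded_trevally"),
  ("black banded", "black_banded_trevally"),
  ("nigrofasciata", "black_banded_trevally"),
  ("prawn", "prawn"),
  ("shrimp", "prawn"),
  ("penaeus", "prawn"),
  ("monodon", "prawn"),
  ("tiger prawn", "prawn"),
  ("tiger shrimp", "prawn"),
  ("squid", "squid"),
  ("uroteuthis", "squid"),
  ("duvaucelii", "squid"),
  ("calamari", "squid"),
  ("indian squid", "squid"),
  ("yellowfin", "yellowfin_tuna"),
  ("thunnus", "yellowfin_tuna"),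
  ("albacares", "yellowfin_tuna"),
  ("kanta", "yellowfin_tuna"),
  ("yellow fin", "yellowfin_tuna"),
  ("hilsa", "hilsa"),
  ("ilisha", "hilsa"),
  ("tenualosa", "hilsa"),
  ("jatka", "hilsa"),
  ("hilsha", "hilsa")]

def detect_species_alt (question : String) : Option String :=
  (KEYWORD_TABLE.find? (fun p => PySem.Str.isIn p.1 (PySem.Str.lower question))).map Prod.snd

-- ===== PRECONDITION & SPEC =====
def Spec_detect_species (question : String) (out : Option String) : Prop := out = detect_species_alt question
instance (question : String) (out : Option String) : Decidable (Spec_detect_species question out) := by unfold Spec_detect_species; infer_instance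

-- ===== CLAIM =====
def Claim_equal_detect_species : Prop := ∀ (question : String), Dom_detect_species question → Spec_detect_species question (detect_species question)

-- ===== LEMMAS AND PROOFS =====
-- the (question-independent) stable descending sort of A, evaluated:
def SORTED_ITEMS : List (String × List String) := [
  ("sardine", ["sardine", "sardinella", "mathi", "oil sardine", "longiceps", "indian oil sardine"]),
  ("skipjack_tuna", ["skipjack", "katsuwonus", "pelamis", "stripe tuna", "stripe belly tuna"]),
  ("spiny_lobster", ["lobster", "panulirus", "homarus", "spiny lobster", "scalloped lobster"]),
  ("seer_fish", ["seer", "surmai", "vanjaram", "scomberomorus", "spanish mackerel", "commerson", "king fish", "kingfish", "narrow barred"]),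
  ("mackerel", ["mackerel", "rastrelliger", "bangda", "ayala", "kanagurta", "indian mackerel"]),
  ("anchovy", ["anchovy", "anchovies", "thryssa", "stolephorus", "cuvierii", "mystax", "indian anchovy"]),
  ("pomfret", ["pomfret", "pampus", "rupchanda", "avoli", "argenteus", "white pomfret"]),
  ("black_banded_trevally", ["trevally", "seriolina", "black banded", "nigrofasciata"]),
  ("prawn", ["prawn", "shrimp", "penaeus", "monodon", "tiger prawn", "tiger shrimp"]),
  ("squid", ["squid", "uroteuthis", "duvaucelii", "calamari", "indian squid"]),
  ("yellowfin_tuna", ["yellowfin", "thunnus", "albacares", "kanta", "yellow fin"]),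
  ("hilsa", ["hilsa", "ilisha", "tenualosa", "jatka", "hilsha"])]

theorem sortEval :
    PySem.List.sorted SPECIES_KEYWORDS.items (fun x => maxKwLen x.2) true = SORTED_ITEMS := by
  decide

-- scanning one species' block of the flat table = testing that species' keywords at once
theorem find_grp (q sp : String) (kws : List String) (rest : List (String × String)) :
    (((kws.map (fun kw => (kw, sp))) ++ rest).find? (fun p => PySem.Str.isIn p.1 q)).map Prod.snd
      = if kws.any (fun kw => PySem.Str.isIn kw q) then some sp
        else ((rest.find? (fun p => PySem.Str.isIn p.1 q)).map Prod.snd) := by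
  induction kws with
  | nil => simp
  | cons k ks ih =>
      cases hk : PySem.Chars.isIn k.toList q.toList with
      | true => simp [PySem.Str.isIn, hk]
      | false =>
          simp [PySem.Str.isIn, hk]
          simpa [PySem.Str.isIn] using ih

theorem tableGrp : KEYWORD_TABLE = (["sardine", "sardinella", "mathi", "oil sardine", "longiceps", "indian oil sardine"].map (fun kw => (kw, "sardine")) ++ (["skipjack", "katsuwonus", "pelamis", "stripe tuna", "stripe belly tuna"].map (fun kw => (kw, "skipjack_tuna")) ++ (["lobster", "panulirus", "homarus", "spiny lobster", "scalloped lobster"].map (fun kw => (kw, "spiny_lobster")) ++ (["seer", "surmai", "vanjaram", "scomberomorus", "spanish mackerel", "commerson", "king fish", "kingfish", "narrow barred"].map (fun kw => (kw, "seer_fish")) ++ (["mackerel", "rastrelliger", "bangda", "ayala", "kanagurta", "indian mackerel"].map (fun kw => (kw, "mackerel")) ++ (["anchovy", "anchovies", "thryssa", "stolephorus", "cuvierii", "mystax", "indian anchovy"].map (fun kw => (kw, "anchovy")) ++ (["pomfret", "pampus", "rupchanda", "avoli", "argenteus", "white pomfret"].map (fun kw => (kw, "pomfret")) ++ (["trevally",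 "seriolina", "black banded", "nigrofasciata"].map (fun kw => (kw, "black_banded_trevally")) ++ (["prawn", "shrimp", "penaeus", "monodon", "tiger prawn", "tiger shrimp"].map (fun kw => (kw, "prawn")) ++ (["squid", "uroteuthis", "duvaucelii", "calamari", "indian squid"].map (fun kw => (kw, "squid")) ++ (["yellowfin", "thunnus", "albacares", "kanta", "yellow fin"].map (fun kw => (kw, "yellowfin_tuna")) ++ (["hilsa", "ilisha", "tenualosa", "jatka", "hilsha"].map (fun kw => (kw, "hilsa")) ++ ([] : List (String × String)))))))))))))) := by
  decide

set_option maxHeartbeats 1000000 in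
theorem ports_agree (q : String) : detect_species q = detect_species_alt q := by
  unfold detect_species detect_species_alt
  rw [sortEval, tableGrp]
  simp only [SORTED_ITEMS, detect_species_loop, find_grp, List.find?_nil, Option.map_none]

-- ===== VERDICT =====
theorem detect_species_spec : Claim_equal_detect_species := by
  intro question _
  unfold Spec_detect_species
  exact ports_agree question
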